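-- pv_equiv track=rewrite | github.com/ColdThunder11/nonebot-adapter-telegram | tools/models_genter.py | method_name_text_builder
-- ===== SOURCE A (Python) =====
-- def method_name_text_builder(html_text : str) -> str:
--     html_text = html_text.strip("\n")
--     plain_text = ""
--     left_count = 0
--     pointer = 0
--     while(pointer < len(html_text)):
--         char = html_text[pointer]
--         if char == "<" :
--             left_count += 1
--             pointer += 1
--             continue
--         elif char == ">":
--             left_count -= 1
--             pointer += 1
--             continue
--         else:
--             if left_count == 0:
--                 plain_text += char
--             pointer += 1
--             continue
--     return plain_text
-- ===== SOURCE B (Python) =====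
-- def method_name_text_builder(html_text: str) -> str:
--     # Segment-based: split on "<", then each piece on ">"; the nesting depth at the
--     # start of a piece selects which ">"-segment (if any) is visible text.
--     out = []
--     k = 0  # bracket depth at the start of the current piece
--     for piece in html_text.strip("\n").split("<"):
--         segs = piece.split(">")
--         if 0 <= k < len(segs):
--             out.append(segs[k])
--         k += 2 - len(segs)
--     return "".join(out)
-- ===== Notes on version B (the rewrite author's own statement) =====
-- stated objective: faster
-- what changed: Replaces A's per-character while loop with quadratic string concatenation by a per-segment algorithm: split on '<', split each piece on '>', index directly into the segment list with the running start-of-piece depth, and join once at the end.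
import Mathlib
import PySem

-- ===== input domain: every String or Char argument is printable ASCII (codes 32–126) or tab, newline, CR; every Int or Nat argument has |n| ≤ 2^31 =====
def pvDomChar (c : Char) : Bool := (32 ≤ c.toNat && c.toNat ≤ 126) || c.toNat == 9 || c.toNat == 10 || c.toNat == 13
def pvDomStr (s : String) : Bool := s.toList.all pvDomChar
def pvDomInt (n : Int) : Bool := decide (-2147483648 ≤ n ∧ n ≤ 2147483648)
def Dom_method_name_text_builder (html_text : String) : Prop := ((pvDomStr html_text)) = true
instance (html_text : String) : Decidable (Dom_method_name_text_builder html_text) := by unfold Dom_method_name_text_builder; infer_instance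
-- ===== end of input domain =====

-- B replaces A's per-character while loop with a segment algorithm: split on '<',
-- split each piece on '>', and index into the segments with the running start-of-piece depth.

-- ===== PORT A =====
-- A's while loop: pointer over chars, running left_count, plain_text accumulator.
def pvALoop (cs : List Char) (leftCount : Int) (plain : List Char) : List Char :=
  match cs with
  | [] => plain
  | c :: rest =>
    if c = '<' then pvALoop rest (leftCount + 1) plain
    else if c = '>' then pvALoop rest (leftCount - 1) plain
    else if leftCount = 0 then pvALoop rest leftCount (plain ++ [c])
    else pvALoop rest leftCount plain

def method_name_text_builder (html_text : String) : String :=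
  String.mk (pvALoop (PySem.Str.stripChars html_text "\n").toList 0 [])

-- ===== PORT B =====
-- Source B's for-loop over s.split("<"): each piece is split on ">", the segment at
-- index k (the depth at the start of the piece) is appended when it exists,
-- and k is updated by 2 - len(segs); the collected segments are joined at the end.
def pvBLoop (pieces : List (List Char)) (k : Int) : List Char :=
  match pieces with
  | [] => []
  | p :: rest =>
    let segs := PySem.Chars.splitOn p ['>']
    (if 0 ≤ k ∧ k < (segs.length : Int) then segs.getD k.toNat [] else []) ++
      pvBLoop rest (k + 2 - (segs.length : Int))

def method_name_text_builder_alt (html_text : String) : String :=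
  String.mk (pvBLoop (PySem.Chars.splitOn (PySem.Str.stripChars html_text "\n").toList ['<']) 0)

-- ===== PRECONDITION & SPEC =====
def Spec_method_name_text_builder (html_text : String) (out : String) : Prop := out = method_name_text_builder_alt html_text
instance (html_text : String) (out : String) : Decidable (Spec_method_name_text_builder html_text out) := by unfold Spec_method_name_text_builder; infer_instance

-- ===== CLAIM (what is proved, stated in full; the proofs are below) =====
def Claim_equal_method_name_text_builder : Prop := ∀ (html_text : String), Dom_method_name_text_builder html_text → Spec_method_name_text_builder html_text (method_name_text_builder html_text)

-- ===== LEMMAS AND PROOFS =====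

-- A simple structural recursion equal to PySem.Chars.splitOn with a single-char separator.
def pvSplit1 (c : Char) : List Char → List (List Char)
  | [] => [[]]
  | a :: rest => if a = c then [] :: pvSplit1 c rest
                 else (pvSplit1 c rest).modifyHead (a :: ·)

lemma pvSplit1_ne_nil (c : Char) (cs : List Char) : pvSplit1 c cs ≠ [] := by
  cases cs with
  | nil => simp [pvSplit1]
  | cons a rest =>
    simp only [pvSplit1]
    split
    · simp
    · cases h : pvSplit1 c rest with
      | nil => exact absurd h (pvSplit1_ne_nil c rest)
      | cons x xs => simp

lemma pvSplit1_cons_self (c : Char) (rest : List Char) :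
    pvSplit1 c (c :: rest) = [] :: pvSplit1 c rest := by
  simp [pvSplit1]

lemma pvSplit1_cons_ne (c a : Char) (rest : List Char) (h : a ≠ c) :
    pvSplit1 c (a :: rest) = (pvSplit1 c rest).modifyHead (a :: ·) := by
  simp [pvSplit1, h]

lemma splitOn_go_eq (c : Char) (l cur : List Char) (acc : List (List Char))
    (fuel : Nat) (hf : l.length < fuel) :
    PySem.Chars.splitOn.go [c] fuel l cur acc =
      acc.reverse ++ (pvSplit1 c l).modifyHead (cur.reverse ++ ·) := by
  induction fuel generalizing l cur acc with
  | zero => omega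
  | succ n ih =>
    cases l with
    | nil => simp [PySem.Chars.splitOn.go, pvSplit1]
    | cons a rest =>
      by_cases hac : a = c
      · subst hac
        have hpre : List.isPrefixOf [a] (a :: rest) = true := by
          simp [List.isPrefixOf]
        rw [PySem.Chars.splitOn.go]
        simp only [hpre, if_pos]
        rw [ih _ _ _ (by simpa using Nat.lt_of_succ_lt_succ hf)]
        rw [pvSplit1_cons_self]
        cases hres : pvSplit1 a rest with
        | nil => exact absurd hres (pvSplit1_ne_nil a rest)
        | cons x xs => simp [hres]
      · have hpre : List.isPrefixOf [c] (a :: rest) = false := by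
          simp [List.isPrefixOf]
          intro h; exact absurd h.symm hac
        rw [PySem.Chars.splitOn.go]
        simp only [hpre]
        rw [if_neg (by simp)]
        rw [ih _ _ _ (by simpa using Nat.lt_of_succ_lt_succ hf)]
        rw [pvSplit1_cons_ne c a rest hac]
        cases h : pvSplit1 c rest with
        | nil => exact absurd h (pvSplit1_ne_nil c rest)
        | cons x xs => simp

lemma splitOn_eq_pvSplit1 (c : Char) (cs : List Char) :
    PySem.Chars.splitOn cs [c] = pvSplit1 c cs := by
  show PySem.Chars.splitOn.go [c] (cs.length + 1) cs [] [] = _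
  rw [splitOn_go_eq c cs [] [] (cs.length + 1) (by omega)]
  cases h : pvSplit1 c cs with
  | nil => exact absurd h (pvSplit1_ne_nil c cs)
  | cons x xs => simp

-- an empty first piece: the '<' just consumed raises the depth by one
lemma pvBLoop_cons_nil (ts : List (List Char)) (k : Int) :
    pvBLoop ([] :: ts) k = pvBLoop ts (k + 1) := by
  simp only [pvBLoop, splitOn_eq_pvSplit1]
  rw [show pvSplit1 '>' ([] : List Char) = [[]] from rfl]
  simp only [List.length_cons, List.length_nil]
  rw [show k + 2 - ((0 + 1 : Nat) : Int) = k + 1 from by push_cast; ring]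
  split_ifs with h1
  · rw [show k = 0 from by omega]
    simp
  · simp

-- a leading '>' in the first piece lowers the depth by one
lemma pvBLoop_cons_gt (h : List Char) (ts : List (List Char)) (k : Int) :
    pvBLoop (('>' :: h) :: ts) k = pvBLoop (h :: ts) (k - 1) := by
  obtain ⟨x, xs, hs⟩ := List.exists_cons_of_ne_nil (pvSplit1_ne_nil '>' h)
  simp only [pvBLoop, splitOn_eq_pvSplit1, pvSplit1_cons_self, hs, List.length_cons]
  rw [show k + 2 - ((xs.length + 1 + 1 : Nat) : Int)
      = k - 1 + 2 - ((xs.length + 1 : Nat) : Int) from by push_cast; ring]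
  congr 1
  split_ifs with h1 h2 h2
  · rw [show k.toNat = (k - 1).toNat + 1 from by omega, List.getD_cons_succ]
  · rw [show k = 0 from by omega]
    simp
  · exfalso; omega
  · rfl

-- a leading non-bracket character in the first piece is emitted iff the depth is 0
lemma pvBLoop_cons_plain (a : Char) (ha : a ≠ '>') (h : List Char)
    (ts : List (List Char)) (k : Int) :
    pvBLoop ((a :: h) :: ts) k =
      (if k = 0 then [a] else []) ++ pvBLoop (h :: ts) k := by
  obtain ⟨x, xs, hs⟩ := List.exists_cons_of_ne_nil (pvSplit1_ne_nil '>' h)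
  simp only [pvBLoop, splitOn_eq_pvSplit1, pvSplit1_cons_ne '>' a h ha, hs,
    List.modifyHead, List.length_cons]
  split_ifs with h1 h2 h2
  · rw [show k = 0 from h2]
    simp
  · rw [show k.toNat = (k.toNat - 1) + 1 from by omega]
    simp
  · exfalso; omega
  · simp

-- main invariant: A's character loop computes B's segment loop over the '<'-split
lemma pvALoop_eq_pvBLoop (cs : List Char) (k : Int) (acc : List Char) :
    pvALoop cs k acc = acc ++ pvBLoop (pvSplit1 '<' cs) k := by
  induction cs generalizing k acc with
  | nil =>
    rw [show pvSplit1 '<' ([] : List Char) = [[]] from rfl, pvBLoop_cons_nil]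
    simp [pvALoop, pvBLoop]
  | cons a rest ih =>
    by_cases hlt : a = '<'
    · subst hlt
      rw [show pvALoop ('<' :: rest) k acc = pvALoop rest (k + 1) acc from by
        simp [pvALoop]]
      rw [ih, pvSplit1_cons_self, pvBLoop_cons_nil]
    · obtain ⟨h, ts, hs⟩ := List.exists_cons_of_ne_nil (pvSplit1_ne_nil '<' rest)
      have hhead : pvSplit1 '<' (a :: rest) = (a :: h) :: ts := by
        rw [pvSplit1_cons_ne '<' a rest hlt, hs]; rfl
      by_cases hgt : a = '>'
      · subst hgt
        rw [show pvALoop ('>' :: rest) k acc = pvALoop rest (k - 1) acc from by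
          simp [pvALoop, hlt]]
        rw [ih, hhead, pvBLoop_cons_gt, hs]
      · rw [show pvALoop (a :: rest) k acc
            = if k = 0 then pvALoop rest k (acc ++ [a]) else pvALoop rest k acc from by
          simp [pvALoop, hlt, hgt]]
        rw [hhead, pvBLoop_cons_plain a hgt h ts k]
        by_cases hk : k = 0
        · rw [if_pos hk, if_pos hk, ih, hs]
          simp
        · rw [if_neg hk, if_neg hk, ih, hs]
          simp

-- ===== VERDICT (by name: the statement is the Claim_ definition above) =====
theorem method_name_text_builder_spec : Claim_equal_method_name_text_builder := by
  intro s _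
  unfold Spec_method_name_text_builder method_name_text_builder method_name_text_builder_alt
  rw [splitOn_eq_pvSplit1]
  exact congrArg String.mk
    (by simpa using pvALoop_eq_pvBLoop (PySem.Str.stripChars s "\n").toList 0 [])
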